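-- pv_equiv track=rewrite | github.com/daniel-reich/turbo-robot | FWh2fGH7aRWALMf3o_3.py | cleave
-- ===== SOURCE A (Python) =====
-- def cleave(string, lst):
--     final_string = []
--     words = sorted(lst, key=lambda w: len(w), reverse=True)
--     #words = sorted(lst)
--
--     while len(string) >= 1:
--         found = False
--         for letter in words:
--             if string[:len('asecond'):] == 'asecond':   #I couldn't figure this one specific word out
--                 string = string[len('asecond')::]
--                 found = True
--                 final_string.append('a second')
--             if string[:len(letter):] == letter:
--                 final_string.append(letter)
--                 string = string[len(letter)::]
--                 found = True
--                 break
--         if not found: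
--             return "Cleaving stalled: Word not found"
--
--     return ' '.join(final_string)
-- ===== SOURCE B (Python) =====
-- def cleave(string, lst):
--     # Segment greedily: strip the special-cased 'asecond' token first, otherwise
--     # take the longest word of lst that prefixes the rest (set lookup per length).
--     if not lst:
--         return "" if not string else "Cleaving stalled: Word not found"
--     words = set(lst)
--     maxlen = max(map(len, lst))
--     out = []
--     s = string
--     while s:
--         if s.startswith('asecond'):
--             out.append('a second')
--             s = s[7:]
--             continue
--         L = min(maxlen, len(s))
--         while L > 0 and s[:L] not in words:
--             L -= 1
--         if L == 0:
--             return "Cleaving stalled: Word not found"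
--         out.append(s[:L])
--         s = s[L:]
--     return ' '.join(out)
-- ===== Notes on version B (the rewrite author's own statement) =====
-- stated objective: faster
-- what changed: B drops A's per-position rescan of the whole length-sorted word list (slice-compare per word) and instead builds one hash set of the words plus their maximum length, taking at each position the longest matching prefix by a length countdown with O(1) set lookups; the 'asecond' special case is handled once per position before matching.
-- outside the precondition, e.g. on cleave('asecondasecond', ['asecond']): A returns 'a second asecond', B returns 'a second a second'
import Mathlib
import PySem

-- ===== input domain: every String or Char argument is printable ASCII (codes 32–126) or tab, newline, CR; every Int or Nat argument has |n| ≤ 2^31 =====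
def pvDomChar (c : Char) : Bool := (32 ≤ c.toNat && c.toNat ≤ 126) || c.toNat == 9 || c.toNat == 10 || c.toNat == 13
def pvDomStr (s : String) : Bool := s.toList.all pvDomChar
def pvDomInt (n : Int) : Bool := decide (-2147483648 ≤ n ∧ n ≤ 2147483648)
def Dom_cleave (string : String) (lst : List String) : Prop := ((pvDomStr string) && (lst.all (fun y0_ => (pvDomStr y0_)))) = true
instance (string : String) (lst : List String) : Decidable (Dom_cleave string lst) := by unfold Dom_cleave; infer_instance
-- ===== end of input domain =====

-- B replaces A's per-position scan of the whole sorted word list by one set of words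
-- plus a longest-first length probe per position (objective: faster when the list is large).

-- ===== PORT A =====
-- inner 'for letter in words' loop: state (string, final_string, found); breaks on a word match
def cleaveInner : List String → String → List String → Bool → String × List String × Bool
  | [], s, fin, found => (s, fin, found)
  | letter :: rest, s, fin, found =>
    let st :=
      if PySem.Str.slice s none (some (PySem.Str.len "asecond")) == "asecond" then
        (PySem.Str.slice s (some (PySem.Str.len "asecond")) none, fin ++ ["a second"], true)
      else (s, fin, found)
    if PySem.Str.slice st.1 none (some (PySem.Str.len letter)) == letter then
      (PySem.Str.slice st.1 (some (PySem.Str.len letter)) none, st.2.1 ++ [letter], true)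
    else cleaveInner rest st.1 st.2.1 st.2.2

-- the 'while len(string) >= 1' loop; fuel (never exhausted when the Python terminates:
-- every continuing iteration consumes at least one character under Pre_)
def cleaveLoop (words : List String) : Nat → String → List String → String
  | 0, _, _ => "Cleaving stalled: Word not found"
  | fuel + 1, s, fin =>
    if 1 ≤ PySem.Str.len s then
      match cleaveInner words s fin false with
      | (s', fin', found) =>
        if found = false then "Cleaving stalled: Word not found"
        else cleaveLoop words fuel s' fin' 
    else PySem.Str.join " " fin

def cleave (string : String) (lst : List String) : String :=
  cleaveLoop (PySem.List.sorted lst (fun w => PySem.Str.len w) true) (string.toList.length + 1) string []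

-- ===== PORT B =====
-- inner 'while L > 0 and s[:L] not in words: L -= 1' countdown
def altFind (ws : PySem.Set String) (s : String) : Nat → Nat
  | 0 => 0
  | L + 1 =>
    if PySem.Set.contains ws (PySem.Str.slice s none (some ((L : Int) + 1))) then L + 1
    else altFind ws s L

-- the 'while s:' loop of B; same length-based fuel
def altLoop (ws : PySem.Set String) (maxlen : Nat) : Nat → String → List String → String
  | 0, _, _ => "Cleaving stalled: Word not found"
  | fuel + 1, s, out =>
    if 1 ≤ PySem.Str.len s then
      if PySem.Str.startswith s "asecond" then
        altLoop ws maxlen fuel (PySem.Str.slice s (some 7) none) (out ++ ["a second"])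
      else
        let L := altFind ws s (min maxlen s.toList.length)
        if L = 0 then "Cleaving stalled: Word not found"
        else altLoop ws maxlen fuel (PySem.Str.slice s (some (L : Int)) none)
              (out ++ [PySem.Str.slice s none (some (L : Int))])
    else PySem.Str.join " " out

def cleave_alt (string : String) (lst : List String) : String :=
  if lst = [] then (if string = "" then "" else "Cleaving stalled: Word not found")
  else
    altLoop (PySem.Set.ofList lst)
      ((PySem.List.max? (lst.map (fun w => PySem.Str.len w)) (fun x => x)).getD 0).toNat
      (string.toList.length + 1) string []

-- ===== PRECONDITION & SPEC =====
-- Pre_ excludes (a) strings containing 'asecondasecond', where the order in which A's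
-- hard-coded 'asecond' hack interleaves with word matching is accidental and either
-- segmentation is defensible, and (b) lists containing the empty word together with a
-- nonempty string, where A loops forever (the empty word matches without consuming input).
def Pre_cleave (string : String) (lst : List String) : Prop :=
  PySem.Str.isIn "asecondasecond" string = false ∧ ("" ∈ lst → string = "")
instance (string : String) (lst : List String) : Decidable (Pre_cleave string lst) := by
  unfold Pre_cleave; infer_instance

def pvWitness_cleave : String × List String := ("thequickfox", ["the", "quick", "fox", "quickfo"])

def Spec_cleave (string : String) (lst : List String) (out : String) : Prop := out = cleave_alt string lst
instance (string : String) (lst : List String) (out : String) : Decidable (Spec_cleave string lst out) := by unfold Spec_cleave; infer_instance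

-- ===== CLAIM (what is proved, stated in full; the proofs are below) =====
def Claim_equal_cleave : Prop := ∀ (string : String) (lst : List String), Dom_cleave string lst → Pre_cleave string lst → Spec_cleave string lst (cleave string lst)

-- ===== LEMMAS AND PROOFS =====

-- string-to-list bridges for the two slice shapes the ports use
theorem sliceTake (s : String) (k : Nat) :
    PySem.Str.slice s none (some (k : Int)) = String.ofList (s.toList.take k) := by
  simp [PySem.Str.slice, PySem.Chars.slice, PySem.List.slice_to_natCast]

theorem sliceDrop (s : String) (k : Nat) :
    PySem.Str.slice s (some (k : Int)) none = String.ofList (s.toList.drop k) := by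
  simp [PySem.Str.slice, PySem.Chars.slice, PySem.List.slice_from_natCast]

theorem strLen (p : String) : PySem.Str.len p = ((p.toList.length : Nat) : Int) := rfl

-- A's 'string[:len(p):] == p' test is a prefix test
theorem slicePrefixIff (s p : String) :
    ((PySem.Str.slice s none (some (PySem.Str.len p)) == p) = true) ↔ p.toList <+: s.toList := by
  rw [strLen, sliceTake, beq_iff_eq, List.prefix_iff_eq_take]
  constructor
  · intro h; rw [← h]; simp
  · intro h; rw [← h]; simp [String.ofList_toList]

theorem startswithIff (s p : String) :
    (PySem.Str.startswith s p = true) ↔ p.toList <+: s.toList := by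
  simp [PySem.Str.startswith, PySem.Chars.startswith, List.isPrefixOf_iff_prefix]

-- first word of ws (in A's sorted order) whose characters prefix cs
def fm : List String → List Char → Option String
  | [], _ => none
  | w :: ws, cs => if w.toList <+: cs then some w else fm ws cs

theorem fm_eq_none_iff (ws : List String) (cs : List Char) :
    fm ws cs = none ↔ ∀ w ∈ ws, ¬ w.toList <+: cs := by
  induction ws with
  | nil => simp [fm]
  | cons u ws ih => by_cases h : u.toList <+: cs <;> simp [fm, h, ih]

theorem fm_eq_some (ws : List String) (cs : List Char) (w : String) (h : fm ws cs = some w) :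
    w ∈ ws ∧ w.toList <+: cs := by
  induction ws with
  | nil => simp [fm] at h
  | cons u ws ih =>
    by_cases hu : u.toList <+: cs
    · simp [fm, hu] at h; subst h; exact ⟨by simp, hu⟩
    · simp [fm, hu] at h
      obtain ⟨hmem, hpre⟩ := ih h
      exact ⟨by simp [hmem], hpre⟩

-- in a length-descending list, the first prefix match is a longest prefix match
theorem fm_max (ws : List String) (cs : List Char) (w : String)
    (hp : ws.Pairwise (fun a b => PySem.Str.len b ≤ PySem.Str.len a))
    (h : fm ws cs = some w) :
    ∀ v ∈ ws, v.toList <+: cs → v.toList.length ≤ w.toList.length := by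
  induction ws with
  | nil => simp [fm] at h
  | cons u ws ih =>
    by_cases hu : u.toList <+: cs
    · simp [fm, hu] at h; subst h
      intro v hv hvp
      rcases List.mem_cons.mp hv with rfl | hv
      · exact le_refl _
      · have := (List.pairwise_cons.mp hp).1 v hv
        rw [strLen, strLen] at this; exact_mod_cast this
    · simp [fm, hu] at h
      intro v hv hvp
      rcases List.mem_cons.mp hv with rfl | hv
      · exact absurd hvp hu
      · exact ih (List.pairwise_cons.mp hp).2 h v hv hvp

-- one pass of A's inner loop when the string does not start with 'asecond'
theorem innerA_no (ws : List String) (s : String) (fin : List String) (found : Bool)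
    (h : ¬ ("asecond".toList <+: s.toList)) :
    cleaveInner ws s fin found =
      match fm ws s.toList with
      | some w => (PySem.Str.slice s (some (PySem.Str.len w)) none, fin ++ [w], true)
      | none => (s, fin, found) := by
  induction ws generalizing found with
  | nil => simp [cleaveInner, fm]
  | cons u ws ih =>
    have hc : ¬ ((PySem.Str.slice s none (some (PySem.Str.len "asecond")) == "asecond") = true) := by
      rw [slicePrefixIff]; exact h
    by_cases hu : u.toList <+: s.toList
    · simp only [cleaveInner, if_neg hc]
      rw [if_pos ((slicePrefixIff s u).mpr hu)]
      simp [fm, hu]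
    · simp only [cleaveInner, if_neg hc]
      rw [if_neg (fun hh => hu ((slicePrefixIff s u).mp hh))]
      simp only [fm, if_neg hu]
      exact ih found

-- one pass of A's inner loop on a string with exactly one leading 'asecond':
-- it equals stripping first and running the pass on the rest with found = True
theorem innerA_ase (u : String) (ws : List String) (s : String) (fin : List String) (found : Bool)
    (h : "asecond".toList <+: s.toList)
    (h2 : ¬ ("asecond".toList <+: s.toList.drop 7)) :
    cleaveInner (u :: ws) s fin found =
      cleaveInner (u :: ws) (PySem.Str.slice s (some (PySem.Str.len "asecond")) none)
        (fin ++ ["a second"]) true := by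
  have hlen : PySem.Str.len "asecond" = ((7 : Nat) : Int) := rfl
  have hs' : (PySem.Str.slice s (some (PySem.Str.len "asecond")) none).toList = s.toList.drop 7 := by
    rw [hlen, sliceDrop]; simp
  have hc : ((PySem.Str.slice s none (some (PySem.Str.len "asecond")) == "asecond") = true) := by
    rw [slicePrefixIff]; exact h
  have hc2 : ¬ ((PySem.Str.slice (PySem.Str.slice s (some (PySem.Str.len "asecond")) none) none
      (some (PySem.Str.len "asecond")) == "asecond") = true) := by
    rw [slicePrefixIff, hs']; exact h2
  conv_lhs => rw [cleaveInner]
  conv_rhs => rw [cleaveInner]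
  simp only [if_pos hc, if_neg hc2]

-- B's countdown returns 0 when no admissible length matches
theorem altFind_zero (ws : PySem.Set String) (s : String) (L0 : Nat)
    (h : ∀ L, 1 ≤ L → L ≤ L0 →
      ¬ (PySem.Set.contains ws (PySem.Str.slice s none (some (L : Int))) = true)) :
    altFind ws s L0 = 0 := by
  induction L0 with
  | zero => rfl
  | succ L ih =>
    rw [altFind]
    rw [if_neg (by have := h (L + 1) (by omega) (by omega); push_cast at this ⊢; exact this)]
    exact ih (fun L' h1 h2 => h L' h1 (by omega))

-- B's countdown returns the largest admissible matching length
theorem altFind_pos (ws : PySem.Set String) (s : String) (L0 Lm : Nat)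
    (h1 : 1 ≤ Lm) (h2 : Lm ≤ L0)
    (hm : PySem.Set.contains ws (PySem.Str.slice s none (some (Lm : Int))) = true)
    (hgt : ∀ L, Lm < L → L ≤ L0 →
      ¬ (PySem.Set.contains ws (PySem.Str.slice s none (some (L : Int))) = true)) :
    altFind ws s L0 = Lm := by
  induction L0 with
  | zero => omega
  | succ L ih =>
    rw [altFind]
    by_cases he : Lm = L + 1
    · subst he
      rw [if_pos (by push_cast at hm ⊢; exact hm)]
    · rw [if_neg (by
        have := hgt (L + 1) (by omega) (by omega)
        push_cast at this ⊢; exact this)]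
      exact ih (by omega) (fun L' ha hb => hgt L' ha (by omega))

-- every word's length is bounded by B's maxlen
theorem maxlen_bound (lst : List String) (w : String) (hw : w ∈ lst) :
    w.toList.length ≤
      ((PySem.List.max? (lst.map (fun w => PySem.Str.len w)) (fun x => x)).getD 0).toNat := by
  cases hmax : PySem.List.max? (lst.map (fun w => PySem.Str.len w)) (fun x => x) with
  | none =>
    rw [PySem.List.max?_eq_none_iff, List.map_eq_nil_iff] at hmax
    simp [hmax] at hw
  | some m =>
    have := PySem.List.max?_isMax hmax (PySem.Str.len w) (List.mem_map_of_mem hw)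
    simp only [strLen] at this
    simp only [Option.getD_some]
    omega

-- the match A finds in its sorted scan is exactly what B's countdown finds
theorem step_match (lst : List String) (s : String) (w : String)
    (hnil : ¬ ("" ∈ lst))
    (h : fm (PySem.List.sorted lst (fun w => PySem.Str.len w) true) s.toList = some w) :
    altFind (PySem.Set.ofList lst) s
        (min ((PySem.List.max? (lst.map (fun w => PySem.Str.len w)) (fun x => x)).getD 0).toNat
          s.toList.length) = w.toList.length ∧
      PySem.Str.slice s none (some ((w.toList.length : Nat) : Int)) = w := by
  obtain ⟨hmem, hpre⟩ := fm_eq_some _ _ _ h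
  rw [PySem.List.mem_sorted] at hmem
  have hwlen : 1 ≤ w.toList.length := by
    rcases Nat.eq_zero_or_pos w.toList.length with h0 | h0
    · rw [List.length_eq_zero_iff, String.toList_eq_nil_iff] at h0
      exact absurd (h0 ▸ hmem) hnil
    · exact h0
  have hple := hpre.length_le
  have hslice : PySem.Str.slice s none (some ((w.toList.length : Nat) : Int)) = w := by
    rw [sliceTake, ← List.prefix_iff_eq_take.mp hpre, String.ofList_toList]
  refine ⟨?_, hslice⟩
  refine altFind_pos _ _ _ _ hwlen (le_min (maxlen_bound lst w hmem) hple) ?_ ?_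
  · rw [hslice, PySem.Set.contains_iff, PySem.Set.mem_ofList]; exact hmem
  · intro L hL hL0 hc
    rw [PySem.Set.contains_iff, PySem.Set.mem_ofList] at hc
    set v := PySem.Str.slice s none (some (L : Int)) with hv
    have hvlist : v.toList = s.toList.take L := by rw [hv, sliceTake]; simp
    have hvpre : v.toList <+: s.toList := by rw [hvlist]; exact List.take_prefix _ _
    have hvlen : v.toList.length = L := by
      rw [hvlist, List.length_take]; omega
    have := fm_max _ _ _ (PySem.List.sorted_pairwise_rev lst _) h v
      ((PySem.List.mem_sorted _ _ _ _).mpr hc) hvpre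
    omega

-- when A's sorted scan finds nothing, B's countdown returns 0
theorem step_nomatch (lst : List String) (s : String)
    (h : fm (PySem.List.sorted lst (fun w => PySem.Str.len w) true) s.toList = none) :
    altFind (PySem.Set.ofList lst) s
        (min ((PySem.List.max? (lst.map (fun w => PySem.Str.len w)) (fun x => x)).getD 0).toNat
          s.toList.length) = 0 := by
  rw [fm_eq_none_iff] at h
  refine altFind_zero _ _ _ (fun L h1 h2 hc => ?_)
  rw [PySem.Set.contains_iff, PySem.Set.mem_ofList] at hc
  set v := PySem.Str.slice s none (some (L : Int)) with hv
  have hvlist : v.toList = s.toList.take L := by rw [hv, sliceTake]; simp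
  exact h v ((PySem.List.mem_sorted _ _ _ _).mpr hc) (by rw [hvlist]; exact List.take_prefix _ _)

theorem not_infix_drop (sub cs : List Char) (k : Nat) (h : ¬ sub <:+: cs) :
    ¬ sub <:+: cs.drop k :=
  fun hh => h (hh.trans (List.drop_suffix k cs).isInfix)

theorem no_double (cs : List Char) (hdbl : ¬ ("asecondasecond".toList <:+: cs))
    (h : "asecond".toList <+: cs) : ¬ ("asecond".toList <+: cs.drop 7) := by
  intro h2
  apply hdbl
  obtain ⟨t, ht⟩ := h2
  obtain ⟨t1, ht1⟩ := h
  have hA7 : ("asecond".toList).length = 7 := by decide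
  have hd7 : cs.drop 7 = t1 := by rw [← ht1, ← hA7, List.drop_left]
  have ht1' : t1 = "asecond".toList ++ t := by rw [← hd7, ← ht]
  have hcs : cs = "asecond".toList ++ ("asecond".toList ++ t) := by rw [← ht1, ht1']
  have hAA : "asecondasecond".toList = "asecond".toList ++ "asecond".toList := by decide
  exact ⟨[], t, by rw [hAA, hcs]; simp⟩

theorem loop_eq (lst : List String) (hlst : lst ≠ []) (hnil : "" ∉ lst) :
    ∀ n fa fb (s : String) (fin : List String),
      s.toList.length ≤ n → s.toList.length + 1 ≤ fa → s.toList.length + 1 ≤ fb →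
      ¬ ("asecondasecond".toList <:+: s.toList) →
      cleaveLoop (PySem.List.sorted lst (fun w => PySem.Str.len w) true) fa s fin =
        altLoop (PySem.Set.ofList lst)
          ((PySem.List.max? (lst.map (fun w => PySem.Str.len w)) (fun x => x)).getD 0).toNat
          fb s fin := by
  intro n
  induction n using Nat.strong_induction_on with
  | _ n ih =>
  intro fa fb s fin hn hfa hfb hdbl
  obtain ⟨fa', rfl⟩ : ∃ k, fa = k + 1 := ⟨fa - 1, by omega⟩
  obtain ⟨fb', rfl⟩ : ∃ k, fb = k + 1 := ⟨fb - 1, by omega⟩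
  rw [cleaveLoop, altLoop]
  by_cases hs : 1 ≤ s.toList.length
  · have hsi : (1 : Int) ≤ PySem.Str.len s := by rw [strLen]; exact_mod_cast hs
    rw [if_pos hsi, if_pos hsi]
    cases hw : PySem.List.sorted lst (fun w => PySem.Str.len w) true with
    | nil => exact absurd ((PySem.List.sorted_eq_nil_iff lst _ true).mp hw) hlst
    | cons u ws =>
      rw [← hw]
      by_cases hase : "asecond".toList <+: s.toList
      · -- one leading 'asecond': A strips inside its pass, B strips as its own iteration
        have hs7 := no_double s.toList hdbl hase
        have h7 : PySem.Str.len "asecond" = ((7 : Nat) : Int) := rfl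
        have hlen7 : 7 ≤ s.toList.length := by
          have := hase.length_le; simpa using this
        have hs' : (PySem.Str.slice s (some (PySem.Str.len "asecond")) none).toList
            = s.toList.drop 7 := by rw [h7, sliceDrop]; simp
        have hsw : PySem.Str.startswith s "asecond" = true := (startswithIff _ _).mpr hase
        rw [if_pos hsw, hw, innerA_ase u ws s fin false hase hs7, ← hw,
          innerA_no _ _ _ _ (by rw [hs']; exact hs7)]
        have h77 : (some (7 : Int)) = (some ((7 : Nat) : Int)) := by norm_num
        set s1 := PySem.Str.slice s (some (PySem.Str.len "asecond")) none with hs1def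
        have hbstep : PySem.Str.slice s (some (7 : Int)) none = s1 := by
          rw [hs1def, h7, h77]
        rw [hbstep]
        have hdbl1 : ¬ ("asecondasecond".toList <:+: s1.toList) := by
          rw [hs']; exact not_infix_drop _ _ _ hdbl
        have hs1len : s1.toList.length = s.toList.length - 7 := by
          rw [hs']; exact List.length_drop
        cases hfm : fm (PySem.List.sorted lst (fun w => PySem.Str.len w) true) s1.toList with
        | none =>
          -- no word matches after the strip: both loops continue from the stripped state
          simp only [hfm]
          rw [if_neg (by simp)]
          exact ih (n - 7) (by omega) fa' fb' s1 (fin ++ ["a second"])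
            (by omega) (by omega) (by omega) hdbl1
        | some v =>
          -- a word matches right after the strip: B needs one more iteration
          simp only [hfm]
          rw [if_neg (by simp)]
          obtain ⟨fb'', rfl⟩ : ∃ k, fb' = k + 1 := ⟨fb' - 1, by omega⟩
          obtain ⟨haf, hsl⟩ := step_match lst s1 v hnil hfm
          obtain ⟨hvmem, hvpre⟩ := fm_eq_some _ _ _ hfm
          rw [PySem.List.mem_sorted] at hvmem
          have hv1 : 1 ≤ v.toList.length := by
            rcases Nat.eq_zero_or_pos v.toList.length with h0 | h0
            · rw [List.length_eq_zero_iff, String.toList_eq_nil_iff] at h0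
              exact absurd (h0 ▸ hvmem) hnil
            · exact h0
          have hvle := hvpre.length_le
          conv_rhs => rw [altLoop]
          have hs1i : (1 : Int) ≤ PySem.Str.len s1 := by rw [strLen]; exact_mod_cast by omega
          rw [if_pos hs1i,
            if_neg (show ¬ (PySem.Str.startswith s1 "asecond" = true) by
              rw [startswithIff, hs']; exact hs7)]
          simp only [haf]
          rw [if_neg (by omega), hsl]
          have hlenv : PySem.Str.len v = ((v.toList.length : Nat) : Int) := rfl
          rw [← hlenv]
          set s2 := PySem.Str.slice s1 (some (PySem.Str.len v)) none with hs2def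
          have hs2 : s2.toList = s1.toList.drop v.toList.length := by
            rw [hs2def, hlenv, sliceDrop]; simp
          have hs2len : s2.toList.length = s1.toList.length - v.toList.length := by
            rw [hs2]; exact List.length_drop
          exact ih (n - 7 - v.toList.length) (by omega) fa' fb'' s2 (fin ++ ["a second"] ++ [v])
            (by omega) (by omega) (by omega)
            (by rw [hs2]; exact not_infix_drop _ _ _ hdbl1)
      · -- no leading 'asecond': plain longest-prefix step on both sides
        rw [innerA_no _ _ _ _ hase,
          if_neg (show ¬ (PySem.Str.startswith s "asecond" = true) by
            rw [startswithIff]; exact hase)]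
        cases hfm : fm (PySem.List.sorted lst (fun w => PySem.Str.len w) true) s.toList with
        | none =>
          simp only [hfm]
          rw [step_nomatch lst s hfm]
          simp
        | some w =>
          simp only [hfm]
          rw [if_neg (by simp)]
          obtain ⟨haf, hsl⟩ := step_match lst s w hnil hfm
          obtain ⟨hwmem, hwpre⟩ := fm_eq_some _ _ _ hfm
          rw [PySem.List.mem_sorted] at hwmem
          have hw1 : 1 ≤ w.toList.length := by
            rcases Nat.eq_zero_or_pos w.toList.length with h0 | h0
            · rw [List.length_eq_zero_iff, String.toList_eq_nil_iff] at h0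
              exact absurd (h0 ▸ hwmem) hnil
            · exact h0
          have hwle := hwpre.length_le
          rw [haf, if_neg (by omega), hsl]
          have hlenw : PySem.Str.len w = ((w.toList.length : Nat) : Int) := rfl
          rw [← hlenw]
          set s2 := PySem.Str.slice s (some (PySem.Str.len w)) none with hs2def
          have hs2 : s2.toList = s.toList.drop w.toList.length := by
            rw [hs2def, hlenw, sliceDrop]; simp
          have hs2len : s2.toList.length = s.toList.length - w.toList.length := by
            rw [hs2]; exact List.length_drop
          exact ih (n - w.toList.length) (by omega) fa' fb' s2 (fin ++ [w])
            (by omega) (by omega) (by omega)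
            (by rw [hs2]; exact not_infix_drop _ _ _ hdbl)
  · have hsi : ¬ ((1 : Int) ≤ PySem.Str.len s) := by rw [strLen]; exact_mod_cast hs
    rw [if_neg hsi, if_neg hsi]

-- ===== VERDICT (by name: the statement is the Claim_ definition above) =====
theorem cleave_spec : Claim_equal_cleave := by
  unfold Claim_equal_cleave
  intro string lst _ hpre
  obtain ⟨hdbl, hemp⟩ := hpre
  unfold Spec_cleave cleave cleave_alt
  by_cases hl : lst = []
  · subst hl
    by_cases hstr : string = ""
    · subst hstr; decide
    · have hs1 : 1 ≤ string.toList.length := by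
        rcases Nat.eq_zero_or_pos string.toList.length with h0 | h0
        · rw [List.length_eq_zero_iff, String.toList_eq_nil_iff] at h0; exact absurd h0 hstr
        · exact h0
      have hsi : (1 : Int) ≤ PySem.Str.len string := by rw [strLen]; exact_mod_cast hs1
      have hsortnil : PySem.List.sorted ([] : List String) (fun w => PySem.Str.len w) true = [] :=
        (PySem.List.sorted_eq_nil_iff _ _ _).mpr rfl
      rw [hsortnil, cleaveLoop, if_pos hsi]
      simp [cleaveInner, hstr]
  · rw [if_neg hl]
    by_cases hstr : string = ""
    · subst hstr
      rw [cleaveLoop, altLoop]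
      norm_num [strLen]
    · have hnil : "" ∉ lst := fun h => hstr (hemp h)
      have hdbl' : ¬ ("asecondasecond".toList <:+: string.toList) := by
        intro h
        have := (PySem.Chars.isIn_iff_infix ("asecondasecond".toList) string.toList).mpr h
        rw [show PySem.Str.isIn "asecondasecond" string
            = PySem.Chars.isIn "asecondasecond".toList string.toList from rfl, this] at hdbl
        simp at hdbl
      exact loop_eq lst hl hnil string.toList.length _ _ string [] le_rfl le_rfl le_rfl hdbl'
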